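-- pv_equiv track=rewrite | github.com/eliskol/computation-and-modeling-homework | 001/code.py | get_first_n_terms_nonrecursive
-- ===== SOURCE A (Python) =====
-- def get_first_n_terms_nonrecursive(n):
--
--     term_list = []
--
--     for i in range(1, n+1):
--
--         if i == 1:
--             new_term = 5
--             term_list.append(new_term)
--
--         else:
--             new_term = 3 * (term_list[i-2]) - 4
--             term_list.append(new_term)
--
--     return term_list
-- ===== SOURCE B (Python) =====
-- def get_first_n_terms_nonrecursive(n):
--     # closed form: term[i] = 2 + 3**i
--     return [2 + 3**i for i in range(1, n + 1)]
-- ===== Notes on version B (the rewrite author's own statement) =====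
-- stated objective: simpler
-- what changed: Replaced the dependency-chained loop, where each term is computed from the previous one read back out of the growing list, with a closed-form expression of the recurrence evaluated independently per index in a single comprehension.
import Mathlib
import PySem

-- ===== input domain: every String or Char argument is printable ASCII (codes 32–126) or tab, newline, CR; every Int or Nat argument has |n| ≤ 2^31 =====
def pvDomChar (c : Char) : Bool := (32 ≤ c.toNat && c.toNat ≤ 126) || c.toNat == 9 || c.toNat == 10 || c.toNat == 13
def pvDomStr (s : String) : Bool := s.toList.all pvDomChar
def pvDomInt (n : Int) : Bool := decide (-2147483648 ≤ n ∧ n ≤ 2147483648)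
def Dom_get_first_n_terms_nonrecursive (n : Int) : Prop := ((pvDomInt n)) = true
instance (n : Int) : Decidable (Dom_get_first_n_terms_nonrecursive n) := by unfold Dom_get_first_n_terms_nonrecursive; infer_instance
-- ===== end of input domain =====

-- ===== PORT A =====
-- Loop over range(1, n+1); term_list[i-2] is always in range in A's loop, so pyGetD's
-- default 0 is never used.
def get_first_n_terms_nonrecursive (n : Int) : List Int :=
  (PySem.List.pyRange 1 (n + 1) 1).foldl
    (fun term_list i =>
      if i == 1 then term_list ++ [5]
      else term_list ++ [3 * PySem.List.pyGetD term_list (i - 2) 0 - 4]) []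

-- ===== PORT B =====
-- B: closed form 2 + 3**i, one independent value per index.
def get_first_n_terms_nonrecursive_alt (n : Int) : List Int :=
  (PySem.List.pyRange 1 (n + 1) 1).map (fun i => 2 + 3 ^ i.toNat)

-- ===== PRECONDITION & SPEC =====
def Spec_get_first_n_terms_nonrecursive (n : Int) (out : List Int) : Prop := out = get_first_n_terms_nonrecursive_alt n
instance (n : Int) (out : List Int) : Decidable (Spec_get_first_n_terms_nonrecursive n out) := by unfold Spec_get_first_n_terms_nonrecursive; infer_instance

-- ===== CLAIM (what is proved, stated in full; the proofs are below) =====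
def Claim_equal_get_first_n_terms_nonrecursive : Prop := ∀ (n : Int), Dom_get_first_n_terms_nonrecursive n → Spec_get_first_n_terms_nonrecursive n (get_first_n_terms_nonrecursive n)

-- ===== LEMMAS AND PROOFS =====

-- Invariant: A's fold over range(1, m+1) produces B's closed-form list.
theorem pv_fold_eq_map (m : Nat) :
    (PySem.List.pyRange 1 ((m : Int) + 1) 1).foldl
      (fun term_list i =>
        if i == 1 then term_list ++ [5]
        else term_list ++ [3 * PySem.List.pyGetD term_list (i - 2) 0 - 4]) ([] : List Int)
    = (PySem.List.pyRange 1 ((m : Int) + 1) 1).map (fun i => 2 + 3 ^ i.toNat) := by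
  induction m with
  | zero => simp [PySem.List.pyRange_one_eq_nil]
  | succ m ih =>
    push_cast
    have hsplit : PySem.List.pyRange 1 ((m : Int) + 1 + 1) 1
        = PySem.List.pyRange 1 ((m : Int) + 1) 1 ++ [(m : Int) + 1] :=
      PySem.List.pyRange_one_succ_right (by omega)
    rw [hsplit, List.foldl_append, List.map_append, ih]
    simp only [List.foldl_cons, List.foldl_nil, List.map_cons, List.map_nil]
    by_cases hm : m = 0
    · subst hm
      norm_num [PySem.List.pyRange_one_eq_nil]
    · have hne : (((m : Int) + 1) == 1) = false := by simp; omega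
      have hidx : ((m : Int) + 1 - 2) = ((m - 1 : Nat) : Int) := by omega
      rw [hne, hidx, PySem.List.pyGetD_natCast]
      rw [List.getD_eq_getElem _ _
        (by simp only [List.length_map, PySem.List.length_pyRange_one]; omega)]
      rw [List.getElem_map, PySem.List.getElem_pyRange_one]
      have htn1 : ((1 : Int) + ((m - 1 : Nat) : Int)).toNat = m := by omega
      have htn2 : (((m : Int) + 1)).toNat = m + 1 := by omega
      rw [htn1, htn2]
      simp [pow_succ]
      ring

-- ===== VERDICT (by name: the statement is the Claim_ definition above) =====
theorem get_first_n_terms_nonrecursive_spec : Claim_equal_get_first_n_terms_nonrecursive := by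
  intro n _
  unfold Spec_get_first_n_terms_nonrecursive get_first_n_terms_nonrecursive get_first_n_terms_nonrecursive_alt
  by_cases hn : n ≤ 0
  · rw [PySem.List.pyRange_one_eq_nil (by omega)]
    simp
  · obtain ⟨m, rfl⟩ : ∃ m : Nat, n = (m : Int) := ⟨n.toNat, by omega⟩
    exact pv_fold_eq_map m
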